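-- pv_equiv track=rewrite | github.com/LioChanDaYo/RGPDpseudonymizer | gdpr_pseudonymizer/nlp/entity_grouping.py | _cluster_org_variants
-- ===== SOURCE A (Python) =====
-- from collections import defaultdict
--
-- def _normalize_org(text: str) -> str:
--     """Normalize ORG entity text for variant comparison.
--
--     Case-normalizes only (conservative approach — ORG variants are harder
--     to heuristically link).
--
--     Args:
--         text: Raw entity text
--
--     Returns:
--         Lowercased text
--     """
--     return text.strip().lower()
--
-- def _cluster_org_variants(
--     keys: list[tuple[str, str]],
-- ) -> list[list[tuple[str, str]]]:
--     """Cluster ORG entity keys by variant relationship.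
--
--     Conservative: only groups exact matches after case normalization.
--
--     Args:
--         keys: List of (text, "ORG") keys
--
--     Returns:
--         List of clusters
--     """
--     if len(keys) <= 1:
--         return [[k] for k in keys]
--
--     normalized: dict[tuple[str, str], str] = {}
--     for key in keys:
--         normalized[key] = _normalize_org(key[0])
--
--     parent: dict[tuple[str, str], tuple[str, str]] = {k: k for k in keys}
--
--     def find(k: tuple[str, str]) -> tuple[str, str]:
--         while parent[k] != k:
--             parent[k] = parent[parent[k]]
--             k = parent[k]
--         return k
--
--     def union(a: tuple[str, str], b: tuple[str, str]) -> None: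
--         ra, rb = find(a), find(b)
--         if ra != rb:
--             parent[ra] = rb
--
--     key_list = list(keys)
--     for i in range(len(key_list)):
--         for j in range(i + 1, len(key_list)):
--             ka, kb = key_list[i], key_list[j]
--             if normalized[ka] == normalized[kb]:
--                 union(ka, kb)
--
--     clusters: dict[tuple[str, str], list[tuple[str, str]]] = defaultdict(list)
--     for k in keys:
--         clusters[find(k)].append(k)
--
--     return list(clusters.values())
-- ===== SOURCE B (Python) =====
-- def _cluster_org_variants(
--     keys: list[tuple[str, str]],
-- ) -> list[list[tuple[str, str]]]:
--     """Cluster ORG keys by exact match after case normalization.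
--
--     One pass: hash-group the keys by their normalized text; each bucket,
--     in first-appearance order, is a cluster.
--     """
--     groups: dict[str, list[tuple[str, str]]] = {}
--     for key in keys:
--         groups.setdefault(key[0].strip().lower(), []).append(key)
--     return list(groups.values())
-- ===== Notes on version B (the rewrite author's own statement) =====
-- stated objective: faster
-- what changed: Replaces the O(n^2) all-pairs union-find (with path-halving find) by a single pass that hash-groups keys by their normalized text into a dict of lists, whose values in first-appearance order are the clusters.
import Mathlib
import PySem

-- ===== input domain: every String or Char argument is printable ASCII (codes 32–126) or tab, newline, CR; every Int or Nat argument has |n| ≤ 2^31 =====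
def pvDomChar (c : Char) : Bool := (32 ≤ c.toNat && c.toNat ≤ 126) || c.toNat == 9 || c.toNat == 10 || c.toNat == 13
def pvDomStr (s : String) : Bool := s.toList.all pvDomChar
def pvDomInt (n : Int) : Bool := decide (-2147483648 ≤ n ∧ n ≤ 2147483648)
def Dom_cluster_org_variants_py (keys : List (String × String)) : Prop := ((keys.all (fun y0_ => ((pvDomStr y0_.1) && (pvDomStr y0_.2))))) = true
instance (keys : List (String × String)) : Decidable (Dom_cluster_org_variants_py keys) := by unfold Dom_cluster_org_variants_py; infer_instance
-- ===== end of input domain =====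

-- B replaces A's O(n^2) all-pairs union-find by a single hash-grouping pass over the keys
-- (group by normalized text); same clusters, same order. Equality of return values is proved
-- for all inputs (both functions are total).

-- ===== PORT A =====
-- _normalize_org(text) = text.strip().lower()
def pvNormOrg (text : String) : String := PySem.Str.lower (PySem.Str.strip text)

-- find(k): 'while parent[k] != k: parent[k] = parent[parent[k]]; k = parent[k]; return k'.
-- The while-loop is ported with fuel keys.length + 1, which the proofs show is never exhausted
-- (parent chains strictly increase in first-occurrence index); parent[x] is ported as getD x x —
-- exact, since every find argument is a key of the parent dict (KeyError is unreachable).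
def pvFind (fuel : Nat) (P : PySem.Dict (String × String) (String × String)) (k : String × String) :
    PySem.Dict (String × String) (String × String) × (String × String) :=
  match fuel with
  | 0 => (P, k)
  | fuel + 1 =>
    let pk := P.getD k k
    if pk = k then (P, k)
    else
      let P' := P.insert k (P.getD pk pk)
      pvFind fuel P' (P'.getD k k)

-- union(a, b): 'ra, rb = find(a), find(b); if ra != rb: parent[ra] = rb'
def pvUnion (fuel : Nat) (P : PySem.Dict (String × String) (String × String))
    (a b : String × String) : PySem.Dict (String × String) (String × String) :=
  let r1 := pvFind fuel P a
  let r2 := pvFind fuel r1.1 b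
  if r1.2 ≠ r2.2 then r2.1.insert r1.2 r2.2 else r2.1

def cluster_org_variants_py (keys : List (String × String)) : List (List (String × String)) :=
  if keys.length ≤ 1 then keys.map (fun k => [k])
  else
    let normalized := keys.foldl (fun d k => d.insert k (pvNormOrg k.1)) PySem.Dict.empty
    let parent := keys.foldl (fun d k => d.insert k k) PySem.Dict.empty
    let fuel := keys.length + 1
    -- key_list = list(keys); for i in range(len(key_list)): for j in range(i+1, len(key_list)): …
    let parent1 := (PySem.List.pyRange 0 (PySem.List.len keys) 1).foldl (fun P i =>
      (PySem.List.pyRange (i + 1) (PySem.List.len keys) 1).foldl (fun P j =>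
        let ka := PySem.List.pyGetD keys i ("", "")
        let kb := PySem.List.pyGetD keys j ("", "")
        if normalized.getD ka "" = normalized.getD kb "" then pvUnion fuel P ka kb else P) P) parent
    -- clusters = defaultdict(list); for k in keys: clusters[find(k)].append(k)
    let fin := keys.foldl (fun (st : _ × PySem.Dict (String × String) (List (String × String))) k =>
      let r := pvFind fuel st.1 k
      (r.1, st.2.modify r.2 [] (· ++ [k]))) (parent1, PySem.Dict.empty)
    fin.2.values

-- ===== PORT B =====
-- groups = {}; for key in keys: groups.setdefault(key[0].strip().lower(), []).append(key)
-- return list(groups.values())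
def cluster_org_variants_py_alt (keys : List (String × String)) : List (List (String × String)) :=
  (keys.foldl (fun g k => g.modify (PySem.Str.lower (PySem.Str.strip k.1)) [] (· ++ [k]))
    PySem.Dict.empty).values

-- ===== PRECONDITION & SPEC =====
def Spec_cluster_org_variants_py (keys : List (String × String)) (out : List (List (String × String))) : Prop := out = cluster_org_variants_py_alt keys
instance (keys : List (String × String)) (out : List (List (String × String))) : Decidable (Spec_cluster_org_variants_py keys out) := by unfold Spec_cluster_org_variants_py; infer_instance

-- ===== CLAIM (what is proved, stated in full; the proofs are below) =====
def Claim_equal_cluster_org_variants_py : Prop := ∀ (keys : List (String × String)), Dom_cluster_org_variants_py keys → Spec_cluster_org_variants_py keys (cluster_org_variants_py keys)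

-- ===== LEMMAS AND PROOFS =====

-- notation: K is the key type, S the fixed key list
abbrev pvK : Type := String × String
abbrev pvPD : Type := PySem.Dict pvK pvK

-- the normalized class label of a key
def pvC (k : pvK) : String := pvNormOrg k.1
-- parent[x], read functionally
def pvPf (P : pvPD) (x : pvK) : pvK := P.getD x x
-- first-occurrence index of a key
def pvIdx (S : List pvK) (k : pvK) : Nat := S.idxOf k
-- first index of a class
def pvFirst (S : List pvK) (v : String) : Nat := S.findIdx (fun k => pvC k == v)
-- the distinct class-v members among the first c keys, in order
def pvL (S : List pvK) (v : String) (c : Nat) : List pvK :=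
  PySem.List.dedup ((S.take c).filter (fun k => pvC k == v))
-- their last element = current root of the unified part of class v
def pvLastD (S : List pvK) (v : String) (c : Nat) : pvK := (pvL S v c).getLastD ("", "")
-- final root of class v
def pvRfin (S : List pvK) (v : String) : pvK := pvLastD S v S.length

-- parent-forest invariant: pointers stay inside S, inside the class, and strictly increase pvIdx
def pvGood (S : List pvK) (P : pvPD) : Prop :=
  ∀ k ∈ S, pvPf P k ∈ S ∧ pvC (pvPf P k) = pvC k ∧ (pvPf P k = k ∨ pvIdx S k < pvIdx S (pvPf P k))

-- the (pure) root of k: iterate pvPf m times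
def pvRootN : Nat → pvPD → pvK → pvK
  | 0, _, k => k
  | m + 1, P, k => if pvPf P k = k then k else pvRootN m P (pvPf P k)

def pvRoot (S : List pvK) (P : pvPD) (k : pvK) : pvK := pvRootN S.length P k

-- the intended root of k after the double loop has processed outer rows < I and,
-- on row I (when I is the first index of its class), inner columns < J
def pvRt (S : List pvK) (I J : Nat) (k : pvK) : pvK :=
  if pvFirst S (pvC k) < I then pvLastD S (pvC k) S.length
  else if pvFirst S (pvC k) = I ∧ pvIdx S k < J then pvLastD S (pvC k) J
  else k

def pvInv (S : List pvK) (P : pvPD) (I J : Nat) : Prop :=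
  pvGood S P ∧ ∀ k ∈ S, pvRoot S P k = pvRt S I J k

theorem pvPf_insert (P : pvPD) (a b x : pvK) :
    pvPf (P.insert a b) x = if x = a then b else pvPf P x := by
  unfold pvPf
  exact PySem.Dict.getD_insert P a x b x

theorem pvIdx_lt_of_mem {S : List pvK} {k : pvK} (h : k ∈ S) : pvIdx S k < S.length :=
  List.idxOf_lt_length_of_mem h

theorem pvIdx_getElem {S : List pvK} {k : pvK} (h : k ∈ S) :
    S[pvIdx S k]'(pvIdx_lt_of_mem h) = k :=
  List.getElem_idxOf (pvIdx_lt_of_mem h)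

theorem pvIdx_inj {S : List pvK} {x k : pvK} (hx : x ∈ S) (hk : k ∈ S)
    (h : pvIdx S x = pvIdx S k) : x = k := by
  have e1 : S[pvIdx S x]? = some x := by
    rw [List.getElem?_eq_getElem (pvIdx_lt_of_mem hx)]
    exact congrArg some (pvIdx_getElem hx)
  have e2 : S[pvIdx S k]? = some k := by
    rw [List.getElem?_eq_getElem (pvIdx_lt_of_mem hk)]
    exact congrArg some (pvIdx_getElem hk)
  rw [h] at e1
  exact Option.some.inj (e1.symm.trans e2)

theorem pvIdx_eq_imp {S : List pvK} {k : pvK} {J : Nat} (hk : k ∈ S) (hJ : J < S.length)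
    (h : pvIdx S k = J) : S[J]'hJ = k := by
  have e1 : S[pvIdx S k]? = some k := by
    rw [List.getElem?_eq_getElem (pvIdx_lt_of_mem hk)]
    exact congrArg some (pvIdx_getElem hk)
  rw [h, List.getElem?_eq_getElem hJ] at e1
  exact Option.some.inj e1

theorem pvIdx_le {S : List pvK} {i : Nat} {k : pvK} (h : i < S.length) (he : S[i] = k) :
    pvIdx S k ≤ i := by
  induction S generalizing i with
  | nil => simp at h
  | cons a t ih =>
    unfold pvIdx
    rw [List.idxOf_cons]
    cases i with
    | zero =>
      simp only [List.getElem_cons_zero] at he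
      simp [he]
    | succ i =>
      cases hak : (a == k) with
      | true => simp
      | false =>
        simp only [Bool.cond_false]
        have : pvIdx t k ≤ i := ih (by simpa using h) (by simpa using he)
        unfold pvIdx at this
        omega

theorem pvIdx_lt_of_mem_take {S : List pvK} {k : pvK} {c : Nat} (h : k ∈ S.take c) :
    pvIdx S k < c := by
  obtain ⟨i, hi, he⟩ := List.getElem_of_mem h
  have hlen : (S.take c).length ≤ c := by rw [List.length_take]; omega
  have hiS : i < S.length := by have := List.length_take (i := c) (l := S); omega
  have : pvIdx S k ≤ i := pvIdx_le hiS (by rw [← List.getElem_take (h := hi)]; exact he)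
  omega

theorem pvMem_take_of_idx_lt {S : List pvK} {k : pvK} (h : k ∈ S) {c : Nat}
    (hc : pvIdx S k < c) : k ∈ S.take c := by
  have hlt := pvIdx_lt_of_mem h
  have hlen : pvIdx S k < (S.take c).length := by rw [List.length_take]; omega
  have he : (S.take c)[pvIdx S k]'hlen = k := by
    rw [List.getElem_take]; exact pvIdx_getElem h
  exact he ▸ List.getElem_mem hlen

theorem pvRootN_stable {S : List pvK} {P : pvPD} (hG : pvGood S P) {k : pvK} (hk : k ∈ S)
    {m m' : Nat} (hm : S.length ≤ m + pvIdx S k) (hm' : S.length ≤ m' + pvIdx S k) :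
    pvRootN m P k = pvRootN m' P k := by
  suffices H : ∀ d k, k ∈ S → S.length - pvIdx S k ≤ d → ∀ m m',
      S.length ≤ m + pvIdx S k → S.length ≤ m' + pvIdx S k →
      pvRootN m P k = pvRootN m' P k from H _ k hk le_rfl m m' hm hm'
  intro d
  induction d with
  | zero => intro k hk hd m m' _ _; have := pvIdx_lt_of_mem hk; omega
  | succ d ih =>
    intro k hk hd m m' hm hm'
    have hidx := pvIdx_lt_of_mem hk
    obtain ⟨m, rfl⟩ : ∃ t, m = t + 1 := ⟨m - 1, by omega⟩
    obtain ⟨m', rfl⟩ : ∃ t, m' = t + 1 := ⟨m' - 1, by omega⟩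
    by_cases hp : pvPf P k = k
    · simp [pvRootN, hp]
    · simp only [pvRootN, if_neg hp]
      obtain ⟨hmem, _, hlt⟩ := hG k hk
      have hlt' : pvIdx S k < pvIdx S (pvPf P k) := hlt.resolve_left hp
      exact ih (pvPf P k) hmem (by omega) _ _ (by omega) (by omega)

theorem pvRoot_eq_self {S : List pvK} {P : pvPD} {k : pvK} (hk : k ∈ S)
    (h : pvPf P k = k) : pvRoot S P k = k := by
  have hpos : 0 < S.length := List.length_pos_of_mem hk
  unfold pvRoot
  obtain ⟨n, hn⟩ : ∃ n, S.length = n + 1 := ⟨S.length - 1, by omega⟩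
  rw [hn]
  simp [pvRootN, h]

theorem pvRoot_step {S : List pvK} {P : pvPD} (hG : pvGood S P) {k : pvK} (hk : k ∈ S)
    (h : pvPf P k ≠ k) : pvRoot S P k = pvRoot S P (pvPf P k) := by
  have hidx := pvIdx_lt_of_mem hk
  obtain ⟨hmem, _, hlt⟩ := hG k hk
  have hlt' := hlt.resolve_left h
  obtain ⟨n, hn⟩ : ∃ n, S.length = n + 1 := ⟨S.length - 1, by omega⟩
  have h1 : pvRoot S P k = pvRootN n P (pvPf P k) := by
    unfold pvRoot
    rw [hn]
    simp [pvRootN, h]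
  rw [h1]
  exact pvRootN_stable hG hmem (by omega) (by omega)

theorem pvRoot_props {S : List pvK} {P : pvPD} (hG : pvGood S P) {k : pvK} (hk : k ∈ S) :
    pvRoot S P k ∈ S ∧ pvC (pvRoot S P k) = pvC k ∧ pvPf P (pvRoot S P k) = pvRoot S P k ∧
      pvIdx S k ≤ pvIdx S (pvRoot S P k) := by
  suffices H : ∀ d k, k ∈ S → S.length - pvIdx S k ≤ d →
      pvRoot S P k ∈ S ∧ pvC (pvRoot S P k) = pvC k ∧ pvPf P (pvRoot S P k) = pvRoot S P k ∧
      pvIdx S k ≤ pvIdx S (pvRoot S P k) from H _ k hk le_rfl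
  intro d
  induction d with
  | zero => intro k hk hd; have := pvIdx_lt_of_mem hk; omega
  | succ d ih =>
    intro k hk hd
    by_cases hp : pvPf P k = k
    · rw [pvRoot_eq_self hk hp]
      exact ⟨hk, rfl, hp, le_rfl⟩
    · obtain ⟨hmem, hcls, hlt⟩ := hG k hk
      have hlt' := hlt.resolve_left hp
      rw [pvRoot_step hG hk hp]
      obtain ⟨h1, h2, h3, h4⟩ := ih (pvPf P k) hmem (by omega)
      exact ⟨h1, h2.trans hcls, h3, by omega⟩

theorem pvRoot_grand {S : List pvK} {P : pvPD} (hG : pvGood S P) {k : pvK} (hk : k ∈ S)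
    (h : pvPf P k ≠ k) : pvRoot S P (pvPf P (pvPf P k)) = pvRoot S P k := by
  obtain ⟨hmem, _, _⟩ := hG k hk
  by_cases hpp : pvPf P (pvPf P k) = pvPf P k
  · rw [hpp]; exact (pvRoot_step hG hk h).symm
  · exact (pvRoot_step hG hmem hpp).symm.trans (pvRoot_step hG hk h).symm

theorem pvHalve {S : List pvK} {P : pvPD} (hG : pvGood S P) {k : pvK} (hk : k ∈ S)
    (hne : pvPf P k ≠ k) :
    pvGood S (P.insert k (pvPf P (pvPf P k))) ∧
      ∀ x ∈ S, pvRoot S (P.insert k (pvPf P (pvPf P k))) x = pvRoot S P x := by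
  obtain ⟨hpk_mem, hpk_cls, hpk_lt⟩ := hG k hk
  obtain ⟨hg_mem, hg_cls, hg_lt⟩ := hG (pvPf P k) hpk_mem
  have hkpk : pvIdx S k < pvIdx S (pvPf P k) := hpk_lt.resolve_left hne
  have hkg : pvIdx S k < pvIdx S (pvPf P (pvPf P k)) := by
    rcases hg_lt with h | h
    · rw [h]; exact hkpk
    · omega
  have hGood' : pvGood S (P.insert k (pvPf P (pvPf P k))) := by
    intro x hx
    simp only [pvPf_insert]
    by_cases hxk : x = k
    · subst hxk
      rw [if_pos rfl]
      exact ⟨hg_mem, hg_cls.trans hpk_cls, Or.inr hkg⟩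
    · rw [if_neg hxk]
      exact hG x hx
  refine ⟨hGood', ?_⟩
  have hroot_g : pvRoot S P (pvPf P (pvPf P k)) = pvRoot S P k := pvRoot_grand hG hk hne
  suffices H : ∀ d x, x ∈ S → S.length - pvIdx S x ≤ d →
      pvRoot S (P.insert k (pvPf P (pvPf P k))) x = pvRoot S P x from
    fun x hx => H _ x hx le_rfl
  intro d
  induction d with
  | zero => intro x hx hd; have := pvIdx_lt_of_mem hx; omega
  | succ d ih =>
    intro x hx hd
    by_cases hxk : x = k
    · subst hxk
      have hpf' : pvPf (P.insert x (pvPf P (pvPf P x))) x = pvPf P (pvPf P x) := by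
        rw [pvPf_insert, if_pos rfl]
      have hgx : pvPf P (pvPf P x) ≠ x := by
        intro h
        rw [h] at hkg
        omega
      rw [pvRoot_step hGood' hx (by rw [hpf']; exact hgx), hpf',
        ih (pvPf P (pvPf P x)) hg_mem (by omega)]
      exact hroot_g
    · have hpf' : pvPf (P.insert k (pvPf P (pvPf P k))) x = pvPf P x := by
        rw [pvPf_insert, if_neg hxk]
      by_cases hpx : pvPf P x = x
      · rw [pvRoot_eq_self hx (by rw [hpf', hpx]), pvRoot_eq_self hx hpx]
      · obtain ⟨hm, _, hl⟩ := hG x hx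
        have hl' := hl.resolve_left hpx
        rw [pvRoot_step hGood' hx (by rw [hpf']; exact hpx), hpf', pvRoot_step hG hx hpx]
        exact ih (pvPf P x) hm (by omega)

theorem pvFind_spec {S : List pvK} : ∀ (fuel : Nat) (P : pvPD) (k : pvK), pvGood S P →
    k ∈ S → S.length + 1 ≤ fuel + pvIdx S k →
    pvGood S (pvFind fuel P k).1 ∧
      (∀ x ∈ S, pvRoot S (pvFind fuel P k).1 x = pvRoot S P x) ∧
      (pvFind fuel P k).2 = pvRoot S P k := by
  intro fuel
  induction fuel with
  | zero => intro P k hG hk hf; have := pvIdx_lt_of_mem hk; omega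
  | succ fuel ih =>
    intro P k hG hk hf
    have hPf : ∀ (Q : pvPD) (x : pvK), Q.getD x x = pvPf Q x := fun _ _ => rfl
    by_cases hp : pvPf P k = k
    · have hres : pvFind (fuel + 1) P k = (P, k) := by
        simp only [pvFind, hPf, if_pos hp]
      rw [hres]
      exact ⟨hG, fun x _ => rfl, (pvRoot_eq_self hk hp).symm⟩
    · have hstep : pvFind (fuel + 1) P k =
          pvFind fuel (P.insert k (pvPf P (pvPf P k)))
            (pvPf (P.insert k (pvPf P (pvPf P k))) k) := by
        simp only [pvFind, hPf, if_neg hp]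
      have hg : pvPf (P.insert k (pvPf P (pvPf P k))) k = pvPf P (pvPf P k) := by
        rw [pvPf_insert, if_pos rfl]
      obtain ⟨hGood', hRoots'⟩ := pvHalve hG hk hp
      obtain ⟨hpk_mem, _, hpk_lt⟩ := hG k hk
      obtain ⟨hg_mem, _, hg_lt⟩ := hG (pvPf P k) hpk_mem
      have hkpk : pvIdx S k < pvIdx S (pvPf P k) := hpk_lt.resolve_left hp
      have hkg : pvIdx S k < pvIdx S (pvPf P (pvPf P k)) := by
        rcases hg_lt with h | h
        · rw [h]; exact hkpk
        · omega
      rw [hstep, hg]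
      obtain ⟨hA, hB, hc⟩ := ih (P.insert k (pvPf P (pvPf P k))) (pvPf P (pvPf P k))
        hGood' hg_mem (by omega)
      refine ⟨hA, fun x hx => (hB x hx).trans (hRoots' x hx), ?_⟩
      rw [hc, hRoots' _ hg_mem]
      exact pvRoot_grand hG hk hp

theorem pvLink {S : List pvK} {P : pvPD} (hG : pvGood S P) {ra rb : pvK}
    (hraS : ra ∈ S) (hrbS : rb ∈ S) (hra : pvPf P ra = ra) (hrb : pvPf P rb = rb)
    (hC : pvC ra = pvC rb) (hidx : pvIdx S ra < pvIdx S rb) :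
    pvGood S (P.insert ra rb) ∧
      ∀ x ∈ S, pvRoot S (P.insert ra rb) x =
        (if pvRoot S P x = ra then rb else pvRoot S P x) := by
  have hne : ra ≠ rb := by intro h; rw [h] at hidx; omega
  have hGood' : pvGood S (P.insert ra rb) := by
    intro x hx
    simp only [pvPf_insert]
    by_cases hxra : x = ra
    · subst hxra; rw [if_pos rfl]; exact ⟨hrbS, hC.symm, Or.inr hidx⟩
    · rw [if_neg hxra]; exact hG x hx
  refine ⟨hGood', ?_⟩
  have hpfrb' : pvPf (P.insert ra rb) rb = rb := by
    rw [pvPf_insert, if_neg (fun h => hne h.symm)]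
    exact hrb
  suffices H : ∀ d x, x ∈ S → S.length - pvIdx S x ≤ d →
      pvRoot S (P.insert ra rb) x = if pvRoot S P x = ra then rb else pvRoot S P x from
    fun x hx => H _ x hx le_rfl
  intro d
  induction d with
  | zero => intro x hx hd; have := pvIdx_lt_of_mem hx; omega
  | succ d ih =>
    intro x hx hd
    by_cases hxra : x = ra
    · subst hxra
      have hpf' : pvPf (P.insert x rb) x = rb := by rw [pvPf_insert, if_pos rfl]
      have hrbnex : rb ≠ x := fun h => hne h.symm
      rw [pvRoot_step hGood' hx (by rw [hpf']; exact hrbnex), hpf',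
        pvRoot_eq_self hrbS hpfrb', pvRoot_eq_self hx hra, if_pos rfl]
    · have hpf' : pvPf (P.insert ra rb) x = pvPf P x := by rw [pvPf_insert, if_neg hxra]
      by_cases hpx : pvPf P x = x
      · rw [pvRoot_eq_self hx (by rw [hpf']; exact hpx), pvRoot_eq_self hx hpx, if_neg hxra]
      · obtain ⟨hm, _, hl⟩ := hG x hx
        have hl' := hl.resolve_left hpx
        rw [pvRoot_step hGood' hx (by rw [hpf']; exact hpx), hpf',
          ih (pvPf P x) hm (by omega), pvRoot_step hG hx hpx]

theorem pvUnion_spec {S : List pvK} {P : pvPD} (hG : pvGood S P) {a b : pvK}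
    (ha : a ∈ S) (hb : b ∈ S) (hC : pvC a = pvC b) {fuel : Nat}
    (hf : S.length + 1 ≤ fuel)
    (hord : pvRoot S P a = pvRoot S P b ∨
      pvIdx S (pvRoot S P a) < pvIdx S (pvRoot S P b)) :
    pvGood S (pvUnion fuel P a b) ∧
      ∀ x ∈ S, pvRoot S (pvUnion fuel P a b) x =
        (if pvRoot S P x = pvRoot S P a then pvRoot S P b else pvRoot S P x) := by
  have h1 := pvFind_spec fuel P a hG ha (by omega)
  have h2 := pvFind_spec fuel (pvFind fuel P a).1 b h1.1 hb (by omega)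
  have hra : (pvFind fuel P a).2 = pvRoot S P a := h1.2.2
  have hrb : (pvFind fuel (pvFind fuel P a).1 b).2 = pvRoot S P b :=
    h2.2.2.trans (h1.2.1 b hb)
  have hroots2 : ∀ x ∈ S,
      pvRoot S (pvFind fuel (pvFind fuel P a).1 b).1 x = pvRoot S P x :=
    fun x hx => (h2.2.1 x hx).trans (h1.2.1 x hx)
  simp only [pvUnion]
  by_cases hrr : (pvFind fuel P a).2 = (pvFind fuel (pvFind fuel P a).1 b).2
  · rw [if_neg (not_not_intro hrr)]
    refine ⟨h2.1, fun x hx => ?_⟩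
    rw [hroots2 x hx]
    have hab : pvRoot S P a = pvRoot S P b := by rw [← hra, ← hrb, hrr]
    split_ifs with h
    · rw [← hab, ← h]
    · rfl
  · rw [if_pos hrr]
    have hrane : pvRoot S P a ≠ pvRoot S P b := by rw [← hra, ← hrb]; exact hrr
    have hidx : pvIdx S (pvRoot S P a) < pvIdx S (pvRoot S P b) := hord.resolve_left hrane
    have hpropa := pvRoot_props hG ha
    have hpropb := pvRoot_props hG hb
    have hp2a := pvRoot_props h2.1 ha
    have hp2b := pvRoot_props h2.1 hb
    have hroot2a : pvRoot S (pvFind fuel (pvFind fuel P a).1 b).1 a = pvRoot S P a :=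
      hroots2 a ha
    have hroot2b : pvRoot S (pvFind fuel (pvFind fuel P a).1 b).1 b = pvRoot S P b :=
      hroots2 b hb
    have hfixa : pvPf (pvFind fuel (pvFind fuel P a).1 b).1 (pvRoot S P a) = pvRoot S P a := by
      rw [← hroot2a]; exact hp2a.2.2.1
    have hfixb : pvPf (pvFind fuel (pvFind fuel P a).1 b).1 (pvRoot S P b) = pvRoot S P b := by
      rw [← hroot2b]; exact hp2b.2.2.1
    have hlink := pvLink h2.1 hpropa.1 hpropb.1 hfixa hfixb
      (hpropa.2.1.trans (hC.trans hpropb.2.1.symm)) hidx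
    rw [hra, hrb]
    refine ⟨hlink.1, fun x hx => ?_⟩
    rw [hlink.2 x hx, hroots2 x hx]

theorem pvNorm_getD {S : List pvK} {k : pvK} (h : k ∈ S) :
    (S.foldl (fun d k => d.insert k (pvNormOrg k.1)) PySem.Dict.empty).getD k "" = pvC k := by
  induction S using List.reverseRecOn with
  | nil => simp at h
  | append_singleton t a ih =>
    rw [List.foldl_append, List.foldl_cons, List.foldl_nil, PySem.Dict.getD_insert]
    by_cases hk : k = a
    · rw [if_pos hk, hk]; rfl
    · rw [if_neg hk]
      have hkt : k ∈ t := by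
        rcases List.mem_append.mp h with h1 | h1
        · exact h1
        · exact absurd (List.mem_singleton.mp h1) hk
      exact ih hkt

theorem pvParent0 (S : List pvK) (x : pvK) :
    pvPf (S.foldl (fun d k => d.insert k k) PySem.Dict.empty) x = x := by
  induction S using List.reverseRecOn with
  | nil => simp [pvPf, PySem.Dict.getD_empty]
  | append_singleton t a ih =>
    rw [List.foldl_append, List.foldl_cons, List.foldl_nil, pvPf_insert]
    by_cases hx : x = a
    · rw [if_pos hx, hx]
    · rw [if_neg hx]; exact ih

theorem pvFirst_le_idx {S : List pvK} {k : pvK} (h : k ∈ S) :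
    pvFirst S (pvC k) ≤ pvIdx S k := by
  unfold pvFirst pvIdx
  induction S with
  | nil => simp at h
  | cons a t ih =>
    rw [List.findIdx_cons, List.idxOf_cons]
    cases hak : (a == k) with
    | true =>
      have hpc : (pvC a == pvC k) = true := by
        rw [beq_iff_eq] at hak ⊢; rw [hak]
      simp [hpc]
    | false =>
      cases hpc : (pvC a == pvC k) with
      | true => simp
      | false =>
        simp only [Bool.cond_false]
        have hkt : k ∈ t := by
          rcases List.mem_cons.mp h with h1 | h1
          · exfalso; rw [beq_eq_false_iff_ne] at hak; exact hak h1.symm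
          · exact h1
        have := ih hkt
        omega

theorem pvFirst_eq_imp {S : List pvK} {v : String} {I : Nat} (hF : pvFirst S v = I)
    (hI : I < S.length) : pvC (S[I]'hI) = v := by
  have hlt : List.findIdx (fun k => pvC k == v) S < S.length := by
    unfold pvFirst at hF; omega
  have hp := List.findIdx_getElem (p := fun k => pvC k == v) (xs := S) (w := hlt)
  rw [beq_iff_eq] at hp
  unfold pvFirst at hF
  simp only [hF] at hp
  exact hp

theorem pvGetLastD_mem {α : Type} {l : List α} (h : l ≠ []) (d : α) : l.getLastD d ∈ l := by
  induction l using List.reverseRecOn with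
  | nil => exact absurd rfl h
  | append_singleton t a _ =>
    rw [List.getLastD_eq_getLast?, List.getLast?_concat]
    simp

theorem pvGetLastD_eq {α : Type} {l : List α} (h : l ≠ []) {k : α}
    (hall : ∀ x ∈ l, x = k) (d : α) : l.getLastD d = k :=
  hall _ (pvGetLastD_mem h d)

theorem pvMem_L {S : List pvK} {v : String} {c : Nat} {x : pvK} :
    x ∈ pvL S v c ↔ x ∈ S.take c ∧ pvC x = v := by
  unfold pvL
  simp [List.mem_filter, beq_iff_eq]

theorem pvL_nonempty {S : List pvK} {k : pvK} (h : k ∈ S) {c : Nat}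
    (hc : pvIdx S k < c) : pvL S (pvC k) c ≠ [] :=
  List.ne_nil_of_mem (pvMem_L.mpr ⟨pvMem_take_of_idx_lt h hc, rfl⟩)

theorem pvLastD_mem {S : List pvK} {v : String} {c : Nat} (h : pvL S v c ≠ []) :
    pvLastD S v c ∈ pvL S v c := by
  unfold pvLastD
  exact pvGetLastD_mem h _

theorem pvL_succ {S : List pvK} {v : String} {J : Nat} (hJ : J < S.length) :
    pvL S v (J + 1) = if pvC (S[J]'hJ) = v then PySem.Set.add (pvL S v J) (S[J]'hJ)
      else pvL S v J := by
  unfold pvL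
  rw [List.take_add_one, List.getElem?_eq_getElem hJ]
  simp only [Option.toList_some, List.filter_append]
  by_cases hc : pvC (S[J]'hJ) = v
  · rw [if_pos hc]
    have : List.filter (fun k => pvC k == v) [S[J]'hJ] = [S[J]'hJ] := by simp [hc]
    rw [this, PySem.List.dedup_eq_ofList, PySem.List.dedup_eq_ofList,
      PySem.Set.ofList_append_singleton]
  · rw [if_neg hc]
    have : List.filter (fun k => pvC k == v) [S[J]'hJ] = [] := by simp [hc]
    rw [this, List.append_nil]

theorem pvLastD_first_succ {S : List pvK} {k : pvK} (h : k ∈ S)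
    (heq : pvIdx S k = pvFirst S (pvC k)) :
    pvLastD S (pvC k) (pvIdx S k + 1) = k := by
  have hne : pvL S (pvC k) (pvIdx S k + 1) ≠ [] := pvL_nonempty h (by omega)
  unfold pvLastD
  apply pvGetLastD_eq hne
  intro x hx
  obtain ⟨hxt, hxc⟩ := pvMem_L.mp hx
  have hxi : pvIdx S x < pvIdx S k + 1 := pvIdx_lt_of_mem_take hxt
  have hxS : x ∈ S := List.take_subset _ _ hxt
  have hge : pvFirst S (pvC x) ≤ pvIdx S x := pvFirst_le_idx hxS
  rw [hxc] at hge
  have hxx : pvIdx S x = pvIdx S k := by omega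
  exact pvIdx_inj hxS h hxx

theorem pvRt_zero {S : List pvK} {k : pvK} (h : k ∈ S) : pvRt S 0 1 k = k := by
  unfold pvRt
  rw [if_neg (by omega)]
  by_cases h2 : pvFirst S (pvC k) = 0 ∧ pvIdx S k < 1
  · rw [if_pos h2]
    have h0 : pvIdx S k = 0 := by omega
    have heq : pvIdx S k = pvFirst S (pvC k) := by omega
    have := pvLastD_first_succ h heq
    rw [h0] at this
    exact this
  · rw [if_neg h2]

theorem pvRt_shift {S : List pvK} {I : Nat} {k : pvK} (h : k ∈ S) :
    pvRt S I S.length k = pvRt S (I + 1) (I + 2) k := by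
  rcases lt_trichotomy (pvFirst S (pvC k)) I with hlt | heq | hgt
  · unfold pvRt
    rw [if_pos hlt, if_pos (by omega)]
  · unfold pvRt
    rw [if_neg (by omega), if_pos ⟨heq, pvIdx_lt_of_mem h⟩, if_pos (by omega)]
  · unfold pvRt
    rw [if_neg (by omega), if_neg (by rintro ⟨h1, _⟩; omega), if_neg (by omega)]
    by_cases h2 : pvFirst S (pvC k) = I + 1 ∧ pvIdx S k < I + 2
    · rw [if_pos h2]
      have hle := pvFirst_le_idx h
      have heqi : pvIdx S k = pvFirst S (pvC k) := by omega
      have := pvLastD_first_succ h heqi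
      rw [show I + 2 = pvIdx S k + 1 by omega]
      exact this.symm
    · rw [if_neg h2]

theorem pvRt_succ_frozen {S : List pvK} {I J : Nat} {k : pvK} (hk : k ∈ S)
    (hJ : J < S.length)
    (hcase : pvFirst S (pvC k) = I → pvC (S[J]'hJ) ≠ pvC k ∨ pvIdx S (S[J]'hJ) < J) :
    pvRt S I (J + 1) k = pvRt S I J k := by
  unfold pvRt
  by_cases h1 : pvFirst S (pvC k) < I
  · rw [if_pos h1, if_pos h1]
  · rw [if_neg h1, if_neg h1]
    by_cases hF : pvFirst S (pvC k) = I
    · have hd := hcase hF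
      have hidxne : pvIdx S k ≠ J := by
        intro hE
        have he := pvIdx_eq_imp hk hJ hE
        rcases hd with hne | hlt
        · exact hne (by rw [he])
        · rw [he] at hlt; omega
      have hL : pvL S (pvC k) (J + 1) = pvL S (pvC k) J := by
        rw [pvL_succ hJ]
        by_cases hc : pvC (S[J]'hJ) = pvC k
        · rw [if_pos hc]
          rcases hd with hne | hlt
          · exact absurd hc hne
          · exact PySem.Set.add_of_mem
              (pvMem_L.mpr ⟨pvMem_take_of_idx_lt (List.getElem_mem hJ) hlt, hc⟩)
        · rw [if_neg hc]
      by_cases h2 : pvIdx S k < J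
      · rw [if_pos ⟨hF, by omega⟩, if_pos ⟨hF, h2⟩]
        unfold pvLastD
        rw [hL]
      · rw [if_neg (by rintro ⟨_, hl⟩; omega), if_neg (by rintro ⟨_, hl⟩; omega)]
    · rw [if_neg (fun h => hF h.1), if_neg (fun h => hF h.1)]

theorem pvInner_step {S : List pvK} {P : pvPD} {I J : Nat} (hI : I < S.length)
    (hIJ : I < J) (hJ : J < S.length) (hInv : pvInv S P I J) {fuel : Nat}
    (hf : S.length + 1 ≤ fuel) :
    pvInv S (if pvC (S.getD I ("", "")) = pvC (S.getD J ("", "")) then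
      pvUnion fuel P (S.getD I ("", "")) (S.getD J ("", "")) else P) I (J + 1) := by
  obtain ⟨hG, hR⟩ := hInv
  have hkaE : S.getD I ("", "") = S[I]'hI := List.getD_eq_getElem S _ hI
  have hkbE : S.getD J ("", "") = S[J]'hJ := List.getD_eq_getElem S _ hJ
  have hka : S.getD I ("", "") ∈ S := by rw [hkaE]; exact List.getElem_mem hI
  have hkb : S.getD J ("", "") ∈ S := by rw [hkbE]; exact List.getElem_mem hJ
  have hIa : pvIdx S (S.getD I ("", "")) ≤ I := pvIdx_le hI hkaE.symm
  have hIb : pvIdx S (S.getD J ("", "")) ≤ J := pvIdx_le hJ hkbE.symm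
  by_cases hC : pvC (S.getD I ("", "")) = pvC (S.getD J ("", ""))
  case neg =>
    rw [if_neg hC]
    refine ⟨hG, fun k hk => ?_⟩
    rw [hR k hk]
    refine (pvRt_succ_frozen hk hJ ?_).symm
    intro hF
    left
    intro hcon
    have hSI : pvC (S[I]'hI) = pvC k := pvFirst_eq_imp hF hI
    exact hC (by rw [hkaE, hkbE, hSI, hcon])
  case pos =>
    rw [if_pos hC]
    set ka := S.getD I ("", "") with hkadef
    set kb := S.getD J ("", "") with hkbdef
    by_cases hFst : pvFirst S (pvC ka) = I
    case neg =>
      have hFlt : pvFirst S (pvC ka) < I := by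
        have := pvFirst_le_idx hka; omega
      have hrtka : pvRoot S P ka = pvLastD S (pvC ka) S.length := by
        rw [hR ka hka]; unfold pvRt; rw [if_pos hFlt]
      have hrtkb : pvRoot S P kb = pvLastD S (pvC ka) S.length := by
        rw [hR kb hkb]; unfold pvRt; rw [← hC, if_pos hFlt]
      have hUS := pvUnion_spec hG hka hkb hC (fuel := fuel) (by omega)
        (Or.inl (hrtka.trans hrtkb.symm))
      refine ⟨hUS.1, fun k hk => ?_⟩
      rw [hUS.2 k hk, hR k hk]
      have hcollapse : (if pvRt S I J k = pvRoot S P ka then pvRoot S P kb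
          else pvRt S I J k) = pvRt S I J k := by
        split_ifs with h
        · rw [hrtkb, h, hrtka]
        · rfl
      rw [hcollapse]
      refine (pvRt_succ_frozen hk hJ ?_).symm
      intro hF
      exfalso
      have hSI : pvC (S[I]'hI) = pvC k := pvFirst_eq_imp hF hI
      have hck : pvC ka = pvC k := by rw [hkaE]; exact hSI
      rw [← hck] at hF
      exact hFst hF
    case pos =>
      have hIa' : pvIdx S ka = I := by
        have := pvFirst_le_idx hka; omega
      have hrtka : pvRoot S P ka = pvLastD S (pvC ka) J := by
        rw [hR ka hka]; unfold pvRt; rw [if_neg (by omega), if_pos ⟨hFst, by omega⟩]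
      by_cases hbJ : pvIdx S kb < J
      case pos =>
        have hrtkb : pvRoot S P kb = pvLastD S (pvC ka) J := by
          rw [hR kb hkb]; unfold pvRt; rw [← hC, if_neg (by omega), if_pos ⟨hFst, hbJ⟩]
        have hUS := pvUnion_spec hG hka hkb hC (fuel := fuel) (by omega)
          (Or.inl (hrtka.trans hrtkb.symm))
        refine ⟨hUS.1, fun k hk => ?_⟩
        rw [hUS.2 k hk, hR k hk]
        have hcollapse : (if pvRt S I J k = pvRoot S P ka then pvRoot S P kb
            else pvRt S I J k) = pvRt S I J k := by
          split_ifs with h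
          · rw [hrtkb, h, hrtka]
          · rfl
        rw [hcollapse]
        refine (pvRt_succ_frozen hk hJ ?_).symm
        intro _
        right
        rw [← hkbE]
        exact hbJ
      case neg =>
        have hbJ' : pvIdx S kb = J := by omega
        have hLne : pvL S (pvC ka) J ≠ [] := pvL_nonempty hka (by omega)
        have hrmem := pvLastD_mem (S := S) (v := pvC ka) (c := J) hLne
        obtain ⟨hrtk, hrC⟩ := pvMem_L.mp hrmem
        have hrS : pvLastD S (pvC ka) J ∈ S := List.take_subset _ _ hrtk
        have hridx : pvIdx S (pvLastD S (pvC ka) J) < J := pvIdx_lt_of_mem_take hrtk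
        have hrtkb : pvRoot S P kb = kb := by
          rw [hR kb hkb]; unfold pvRt
          rw [← hC, if_neg (by omega), if_neg (fun h => hbJ h.2)]
        have hUS := pvUnion_spec hG hka hkb hC (fuel := fuel) (by omega)
          (Or.inr (by rw [hrtka, hrtkb]; omega))
        have hkbSJ : (S[J]'hJ) = kb := hkbE.symm
        have hkbnotin : kb ∉ pvL S (pvC ka) J := by
          intro hcon
          exact hbJ (pvIdx_lt_of_mem_take (pvMem_L.mp hcon).1)
        have hLsucc : pvL S (pvC ka) (J + 1) = pvL S (pvC ka) J ++ [kb] := by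
          rw [pvL_succ hJ, hkbSJ, if_pos hC.symm, PySem.Set.add_of_not_mem hkbnotin]
        have hlast' : pvLastD S (pvC ka) (J + 1) = kb := by
          unfold pvLastD
          rw [hLsucc, List.getLastD_eq_getLast?, List.getLast?_concat]
          rfl
        refine ⟨hUS.1, fun k hk => ?_⟩
        rw [hUS.2 k hk, hR k hk, hrtka, hrtkb]
        by_cases hkF : pvFirst S (pvC k) = I
        · have hCk : pvC k = pvC ka := by
            have h1 := pvFirst_eq_imp hkF hI
            have h2 : pvC ka = pvC (S[I]'hI) := by rw [hkaE]
            rw [h2]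
            exact h1.symm
          by_cases hkJ : pvIdx S k < J
          · have e1 : pvRt S I J k = pvLastD S (pvC ka) J := by
              unfold pvRt
              rw [hCk, if_neg (by omega), if_pos ⟨hFst, hkJ⟩]
            have e2 : pvRt S I (J + 1) k = kb := by
              unfold pvRt
              rw [hCk, if_neg (by omega), if_pos ⟨hFst, by omega⟩, hlast']
            rw [e1, e2, if_pos rfl]
          · have e1 : pvRt S I J k = k := by
              unfold pvRt
              rw [hCk, if_neg (by omega), if_neg (fun h => hkJ h.2)]
            rw [e1]
            by_cases hkkb : k = kb
            · subst hkkb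
              have e2 : pvRt S I (J + 1) kb = kb := by
                unfold pvRt
                rw [hCk, if_neg (by omega), if_pos ⟨hFst, by omega⟩, hlast']
              rw [if_neg (by intro h; rw [← h] at hridx; omega), e2]
            · have hkgt : J < pvIdx S k := by
                rcases Nat.lt_or_ge J (pvIdx S k) with h | h
                · exact h
                · exfalso
                  have hkJ' : pvIdx S k = J := by omega
                  apply hkkb
                  exact (pvIdx_eq_imp hk hJ hkJ').symm.trans hkbSJ
              have e2 : pvRt S I (J + 1) k = k := by
                unfold pvRt
                rw [hCk, if_neg (by omega), if_neg (by rintro ⟨_, hl⟩; omega)]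
              rw [e2, if_neg (by intro h; rw [h] at hkgt; omega)]
        · have hCkne : pvC k ≠ pvC ka := by
            intro h
            apply hkF
            rw [h]
            exact hFst
          have hrtclass : pvC (pvRt S I J k) = pvC k := by
            unfold pvRt
            split_ifs with h1 h2
            · have hne := pvL_nonempty hk (c := S.length) (pvIdx_lt_of_mem hk)
              exact (pvMem_L.mp (pvLastD_mem hne)).2
            · have hne := pvL_nonempty hk (c := J) h2.2
              exact (pvMem_L.mp (pvLastD_mem hne)).2
            · rfl
          have hneq : pvRt S I J k ≠ pvLastD S (pvC ka) J := by
            intro h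
            apply hCkne
            rw [← hrtclass, h, hrC]
          rw [if_neg hneq]
          refine (pvRt_succ_frozen hk hJ ?_).symm
          intro hF
          exact (hkF hF).elim

theorem pvGroup_values {β : Type} [BEq β] [LawfulBEq β] [DecidableEq β]
    (lab : pvK → β) (S : List pvK) :
    (S.foldl (fun d k => d.modify (lab k) [] (· ++ [k])) PySem.Dict.empty).values =
      (PySem.Set.ofList (S.map lab)).map (fun v => S.filter (fun k => lab k == v)) := by
  have hnd : (S.foldl (fun d k => d.modify (lab k) [] (· ++ [k]))
      PySem.Dict.empty).keys.Nodup := by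
    apply PySem.Dict.nodup_keys_foldl_modify_key S lab [] (fun _ k => (· ++ [k]))
    simp [PySem.Dict.keys_empty]
  have hkeys : (S.foldl (fun d k => d.modify (lab k) [] (· ++ [k]))
      PySem.Dict.empty).keys = PySem.Set.ofList (S.map lab) := by
    rw [PySem.Dict.keys_foldl_modify_key S lab [] (fun _ k => (· ++ [k])),
      PySem.Dict.keys_empty, PySem.Set.update_nil_left]
  have hget : ∀ c, (S.foldl (fun d k => d.modify (lab k) [] (· ++ [k]))
      PySem.Dict.empty).getD c [] = S.filter (fun k => lab k == c) := by
    intro c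
    have h1 := PySem.Dict.getD_foldl_modify_append
      (S.map (fun k => (lab k, k))) PySem.Dict.empty c
    rw [List.foldl_map] at h1
    simp only [PySem.Dict.getD_empty, List.nil_append, List.filter_map,
      List.map_map] at h1
    have h2 : ((fun (p : β × pvK) => p.1 == c) ∘ fun k => (lab k, k)) =
        fun k => lab k == c := rfl
    have h3 : ((fun (p : β × pvK) => p.2) ∘ fun (k : pvK) => (lab k, k)) = id := rfl
    rw [h2, h3, List.map_id] at h1
    exact h1
  rw [PySem.Dict.values_eq_map_keys _ hnd [], hkeys]
  exact List.map_congr_left (fun v _ => hget v)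

theorem pvLabel_equiv {β γ : Type} [BEq β] [LawfulBEq β] [DecidableEq β]
    [BEq γ] [LawfulBEq γ] [DecidableEq γ] (lab1 : pvK → β) (lab2 : pvK → γ)
    (T : List pvK)
    (H : ∀ a ∈ T, ∀ b ∈ T, (lab1 a = lab1 b ↔ lab2 a = lab2 b)) :
    (PySem.Set.ofList (T.map lab1)).map (fun v => T.filter (fun k => lab1 k == v)) =
      (PySem.Set.ofList (T.map lab2)).map (fun v => T.filter (fun k => lab2 k == v)) := by
  suffices Hs : ∀ (Sl : List pvK), (∀ x ∈ Sl, x ∈ T) →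
      ((PySem.Set.ofList (Sl.map lab1)).map (fun v => T.filter (fun k => lab1 k == v)) =
       (PySem.Set.ofList (Sl.map lab2)).map (fun v => T.filter (fun k => lab2 k == v)))
    from Hs T (fun x hx => hx)
  intro Sl
  induction Sl using List.reverseRecOn with
  | nil => intro _; rfl
  | append_singleton t a ih =>
    intro hsub
    have haT : a ∈ T := hsub a (by simp)
    have htT : ∀ x ∈ t, x ∈ T := fun x hx => hsub x (by simp [hx])
    rw [List.map_append, List.map_append]
    simp only [List.map_cons, List.map_nil]
    rw [PySem.Set.ofList_append_singleton, PySem.Set.ofList_append_singleton]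
    by_cases hm : lab1 a ∈ t.map lab1
    · have hm2 : lab2 a ∈ t.map lab2 := by
        obtain ⟨x, hx, he⟩ := List.mem_map.mp hm
        exact List.mem_map.mpr ⟨x, hx, (H x (htT x hx) a haT).mp he⟩
      rw [PySem.Set.add_of_mem ((PySem.Set.mem_ofList _ _).mpr hm),
        PySem.Set.add_of_mem ((PySem.Set.mem_ofList _ _).mpr hm2)]
      exact ih htT
    · have hm2 : lab2 a ∉ t.map lab2 := by
        intro hc
        obtain ⟨x, hx, he⟩ := List.mem_map.mp hc
        exact hm (List.mem_map.mpr ⟨x, hx, (H x (htT x hx) a haT).mpr he⟩)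
      rw [PySem.Set.add_of_not_mem (fun hc => hm ((PySem.Set.mem_ofList _ _).mp hc)),
        PySem.Set.add_of_not_mem (fun hc => hm2 ((PySem.Set.mem_ofList _ _).mp hc)),
        List.map_append, List.map_append, ih htT]
      congr 1
      simp only [List.map_cons, List.map_nil]
      have : T.filter (fun k => lab1 k == lab1 a) = T.filter (fun k => lab2 k == lab2 a) :=
        List.filter_congr (fun x hx => by
          rw [beq_eq_decide, beq_eq_decide]
          exact decide_eq_decide.mpr (H x hx a haT))
      rw [this]

theorem pvRfin_class {S : List pvK} {a : pvK} (h : a ∈ S) :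
    pvC (pvRfin S (pvC a)) = pvC a := by
  have hne := pvL_nonempty h (c := S.length) (pvIdx_lt_of_mem h)
  exact (pvMem_L.mp (pvLastD_mem hne)).2

theorem pvFinal_fold (S : List pvK) (fuel : Nat) (hf : S.length + 1 ≤ fuel) :
    ∀ (M : List pvK) (P : pvPD) (cl : PySem.Dict pvK (List pvK)), pvGood S P →
      (∀ x ∈ S, pvRoot S P x = pvRfin S (pvC x)) → (∀ k ∈ M, k ∈ S) →
      (M.foldl (fun (st : pvPD × PySem.Dict pvK (List pvK)) k =>
        let r := pvFind fuel st.1 k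
        (r.1, st.2.modify r.2 [] (· ++ [k]))) (P, cl)).2 =
      M.foldl (fun d k => d.modify (pvRfin S (pvC k)) [] (· ++ [k])) cl := by
  intro M
  induction M with
  | nil => intro P cl _ _ _; rfl
  | cons k M ih =>
    intro P cl hG hroots hsub
    have hkS : k ∈ S := hsub k (by simp)
    obtain ⟨hG', hpres, hval⟩ := pvFind_spec fuel P k hG hkS (by omega)
    simp only [List.foldl_cons]
    rw [hval.trans (hroots k hkS)]
    exact ih (pvFind fuel P k).1 _ hG'
      (fun x hx => (hpres x hx).trans (hroots x hx)) (fun x hx => hsub x (by simp [hx]))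

theorem pvDouble_loop (S : List pvK) (fuel : Nat) (hf : fuel = S.length + 1) :
    pvGood S ((PySem.List.pyRange 0 (PySem.List.len S) 1).foldl (fun P i =>
      (PySem.List.pyRange (i + 1) (PySem.List.len S) 1).foldl (fun P j =>
        let ka := PySem.List.pyGetD S i ("", "")
        let kb := PySem.List.pyGetD S j ("", "")
        if (S.foldl (fun d k => d.insert k (pvNormOrg k.1)) PySem.Dict.empty).getD ka "" =
            (S.foldl (fun d k => d.insert k (pvNormOrg k.1)) PySem.Dict.empty).getD kb ""
        then pvUnion fuel P ka kb else P) P)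
      (S.foldl (fun d k => d.insert k k) PySem.Dict.empty)) ∧
    ∀ x ∈ S, pvRoot S ((PySem.List.pyRange 0 (PySem.List.len S) 1).foldl (fun P i =>
      (PySem.List.pyRange (i + 1) (PySem.List.len S) 1).foldl (fun P j =>
        let ka := PySem.List.pyGetD S i ("", "")
        let kb := PySem.List.pyGetD S j ("", "")
        if (S.foldl (fun d k => d.insert k (pvNormOrg k.1)) PySem.Dict.empty).getD ka "" =
            (S.foldl (fun d k => d.insert k (pvNormOrg k.1)) PySem.Dict.empty).getD kb ""
        then pvUnion fuel P ka kb else P) P)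
      (S.foldl (fun d k => d.insert k k) PySem.Dict.empty)) x = pvRfin S (pvC x) := by
  subst hf
  set N := S.foldl (fun d k => d.insert k (pvNormOrg k.1)) PySem.Dict.empty with hN
  set P0 := S.foldl (fun d k => d.insert k k) PySem.Dict.empty with hP0
  have hGood0 : pvGood S P0 := fun k hk =>
    ⟨by rw [hP0, pvParent0]; exact hk, by rw [hP0, pvParent0], Or.inl (by rw [hP0]; exact pvParent0 S k)⟩
  have hInv0 : pvInv S P0 0 1 :=
    ⟨hGood0, fun k hk =>
      (pvRoot_eq_self hk (by rw [hP0]; exact pvParent0 S k)).trans (pvRt_zero hk).symm⟩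
  have step : ∀ (m : Nat), m < S.length → ∀ Q : pvPD, pvInv S Q m (m + 1) →
      pvInv S ((PySem.List.pyRange ((m : Int) + 1) (PySem.List.len S) 1).foldl
        (fun P j =>
          let ka := PySem.List.pyGetD S ((m : Int)) ("", "")
          let kb := PySem.List.pyGetD S j ("", "")
          if N.getD ka "" = N.getD kb "" then pvUnion (S.length + 1) P ka kb else P) Q)
        (m + 1) (m + 2) := by
    intro m hm Q hQ
    have hxm : S.getD m ("", "") ∈ S := by
      rw [List.getD_eq_getElem S _ hm]; exact List.getElem_mem hm
    have istep : ∀ (t : Nat), m + 1 ≤ t → t < S.length → ∀ R : pvPD, pvInv S R m t →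
        pvInv S (List.foldl (fun P j =>
          let ka := PySem.List.pyGetD S ((m : Int)) ("", "")
          let kb := PySem.List.pyGetD S j ("", "")
          if N.getD ka "" = N.getD kb "" then pvUnion (S.length + 1) P ka kb else P)
          R [((t : Nat) : Int)]) m (t + 1) := by
      intro t hmt htn R hR
      rw [List.foldl_cons, List.foldl_nil]
      have hxt : S.getD t ("", "") ∈ S := by
        rw [List.getD_eq_getElem S _ htn]; exact List.getElem_mem htn
      simp only [PySem.List.pyGetD_natCast]
      rw [hN]
      simp only [pvNorm_getD hxm, pvNorm_getD hxt]
      exact pvInner_step hm hmt htn hR le_rfl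
    rw [PySem.List.len_eq]
    have hinner : ∀ t, m + 1 ≤ t → t ≤ S.length →
        pvInv S ((PySem.List.pyRange ((m : Int) + 1) ((t : Nat) : Int) 1).foldl
          (fun P j =>
            let ka := PySem.List.pyGetD S ((m : Int)) ("", "")
            let kb := PySem.List.pyGetD S j ("", "")
            if N.getD ka "" = N.getD kb "" then pvUnion (S.length + 1) P ka kb else P)
          Q) m t := by
      intro t ht
      induction t, ht using Nat.le_induction with
      | base =>
        intro _
        rw [show (((m + 1 : Nat)) : Int) = (m : Int) + 1 from by push_cast; ring,
          PySem.List.pyRange_one_eq_nil (le_refl _), List.foldl_nil]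
        exact hQ
      | succ t ht ihh =>
        intro htn
        have hPrev := ihh (by omega)
        rw [show (((t + 1 : Nat)) : Int) = (t : Int) + 1 from by push_cast; ring,
          PySem.List.pyRange_one_succ_right (by exact_mod_cast ht),
          List.foldl_append]
        exact istep t ht (by omega) _ hPrev
    obtain ⟨hg, hr⟩ := hinner S.length (by omega) le_rfl
    exact ⟨hg, fun k hk => (hr k hk).trans (pvRt_shift hk)⟩
  have outer : ∀ (m : Nat), m ≤ S.length →
      pvInv S ((PySem.List.pyRange 0 ((m : Nat) : Int) 1).foldl (fun P i =>
        (PySem.List.pyRange (i + 1) (PySem.List.len S) 1).foldl (fun P j =>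
          let ka := PySem.List.pyGetD S i ("", "")
          let kb := PySem.List.pyGetD S j ("", "")
          if N.getD ka "" = N.getD kb "" then pvUnion (S.length + 1) P ka kb else P) P)
        P0) m (m + 1) := by
    intro m
    induction m with
    | zero =>
      intro _
      rw [Nat.cast_zero, PySem.List.pyRange_one_eq_nil (le_refl 0), List.foldl_nil]
      exact hInv0
    | succ m ih =>
      intro hm1
      have ihInv := ih (by omega)
      rw [show (((m + 1 : Nat)) : Int) = (m : Int) + 1 from by push_cast; ring,
        PySem.List.pyRange_one_succ_right (by exact_mod_cast Nat.zero_le m),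
        List.foldl_append, List.foldl_cons, List.foldl_nil]
      exact step m (by omega) _ ihInv
  have hfold : PySem.List.pyRange 0 (PySem.List.len S) 1 =
      PySem.List.pyRange 0 ((S.length : Nat) : Int) 1 := by
    rw [PySem.List.len_eq]
  rw [hfold]
  have hfin := outer S.length le_rfl
  refine ⟨hfin.1, fun x hx => ?_⟩
  rw [hfin.2 x hx]
  unfold pvRt pvRfin
  rw [if_pos (by
    have h1 := pvFirst_le_idx hx
    have h2 := pvIdx_lt_of_mem hx
    omega)]

-- ===== VERDICT (by name: the statement is the Claim_ definition above) =====
set_option maxHeartbeats 2000000 in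
theorem cluster_org_variants_py_spec : Claim_equal_cluster_org_variants_py := by
  intro keys _
  unfold Spec_cluster_org_variants_py
  have hB : cluster_org_variants_py_alt keys =
      (PySem.Set.ofList (keys.map pvC)).map (fun v => keys.filter (fun k => pvC k == v)) :=
    pvGroup_values pvC keys
  by_cases hlen : keys.length ≤ 1
  · rcases keys with _ | ⟨a, _ | ⟨b, t⟩⟩
    · rfl
    · have hA1 : cluster_org_variants_py [a] = [[a]] := by
        unfold cluster_org_variants_py
        rw [if_pos (by simp)]
        simp
      have hB1 : cluster_org_variants_py_alt [a] = [[a]] := by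
        have hofl : PySem.Set.ofList [pvC a] = [pvC a] :=
          PySem.Set.ofList_eq_self_of_nodup [pvC a] (by simp)
        calc cluster_org_variants_py_alt [a]
            = (PySem.Set.ofList ([a].map pvC)).map
                (fun v => [a].filter (fun k => pvC k == v)) := pvGroup_values pvC [a]
          _ = [[a]] := by
              rw [List.map_cons, List.map_nil, hofl, List.map_cons, List.map_nil]
              simp
      rw [hA1, hB1]
    · exfalso; simp at hlen
  · have hDL := pvDouble_loop keys (keys.length + 1) rfl
    have hFF := pvFinal_fold keys (keys.length + 1) le_rfl keys _ PySem.Dict.empty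
      hDL.1 hDL.2 (fun k hk => hk)
    have hA : cluster_org_variants_py keys =
        (keys.foldl (fun d k => d.modify (pvRfin keys (pvC k)) [] (· ++ [k]))
          PySem.Dict.empty).values := by
      unfold cluster_org_variants_py
      rw [if_neg hlen]
      exact congrArg PySem.Dict.values hFF
    have Hlab : ∀ a ∈ keys, ∀ b ∈ keys,
        (pvRfin keys (pvC a) = pvRfin keys (pvC b) ↔ pvC a = pvC b) :=
      fun a ha b hb =>
        ⟨fun h => by rw [← pvRfin_class ha, ← pvRfin_class hb, h], fun h => by rw [h]⟩
    calc cluster_org_variants_py keys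
        = (keys.foldl (fun d k => d.modify (pvRfin keys (pvC k)) [] (· ++ [k]))
            PySem.Dict.empty).values := hA
      _ = (PySem.Set.ofList (keys.map (fun k => pvRfin keys (pvC k)))).map
            (fun v => keys.filter (fun k => pvRfin keys (pvC k) == v)) :=
          pvGroup_values (fun k => pvRfin keys (pvC k)) keys
      _ = (PySem.Set.ofList (keys.map pvC)).map
            (fun v => keys.filter (fun k => pvC k == v)) :=
          pvLabel_equiv (fun k => pvRfin keys (pvC k)) pvC keys Hlab
      _ = cluster_org_variants_py_alt keys := hB.symm
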